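-- pv_equiv track=rewrite | github.com/mdmake/yp_algorithm | sprint_4/task_H.py | myHash
-- ===== SOURCE A (Python) =====
-- def myHash(s):
--
--     hashTable = dict()
--
--     hashSum = 0
--     for i, char in enumerate(s):
--         if char not in hashTable:
--             hashTable[char] = i
--
--         hashSum += hashTable[char]*i
--     return hashSum
-- ===== SOURCE B (Python) =====
-- def myHash(s):
--     groups = {}
--     for i, c in enumerate(s):
--         if c in groups:
--             first, possum = groups[c]
--             groups[c] = (first, possum + i)
--         else:
--             groups[c] = (i, i)
--     total = 0
--     for first, possum in groups.values():
--         total += first * possum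
--     return total
-- ===== Notes on version B (the rewrite author's own statement) =====
-- stated objective: alternative
-- what changed: B regroups the sum by distinct character: one pass builds (first_index, positions_sum) per character, then a second loop over the dict's values accumulates first_index*positions_sum, exploiting that the first-occurrence factor is constant per character; A accumulates first*index per position inside the single scan.
import Mathlib
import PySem

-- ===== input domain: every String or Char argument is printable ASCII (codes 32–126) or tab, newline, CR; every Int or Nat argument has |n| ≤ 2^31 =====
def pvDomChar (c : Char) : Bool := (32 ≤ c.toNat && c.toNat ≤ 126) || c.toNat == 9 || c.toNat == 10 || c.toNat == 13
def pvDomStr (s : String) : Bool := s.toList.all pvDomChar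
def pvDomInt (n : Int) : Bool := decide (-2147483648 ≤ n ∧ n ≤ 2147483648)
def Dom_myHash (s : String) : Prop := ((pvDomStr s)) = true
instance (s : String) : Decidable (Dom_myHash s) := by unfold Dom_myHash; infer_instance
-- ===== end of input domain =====

-- B groups the sum by distinct character: one pass builds (first_index, positions_sum) per
-- character, a second pass over the dict's values sums first_index * positions_sum; objective: alternative.

-- ===== PORT A =====
-- the for-loop over enumerate(s) as structural recursion carrying (i, hashTable, hashSum)
def myHashGo : List Char → Int → PySem.Dict Char Int → Int → Int
  | [], _, _, hashSum => hashSum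
  | c :: rest, i, d, hashSum =>
    let d' := if d.contains c then d else d.insert c i
    myHashGo rest (i + 1) d' (hashSum + d'.getD c 0 * i)

def myHash (s : String) : Int := myHashGo s.toList 0 PySem.Dict.empty 0

-- ===== PORT B =====
-- first loop of Source B: fold over enumerate(s) building char -> (first, possum)
def myHashAltStep (g : PySem.Dict Char (Int × Int)) (p : Int × Char) :
    PySem.Dict Char (Int × Int) :=
  if g.contains p.2 then
    let q := g.getD p.2 (0, 0)
    g.insert p.2 (q.1, q.2 + p.1)
  else
    g.insert p.2 (p.1, p.1)

def myHash_alt (s : String) : Int :=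
  let g := (PySem.List.enumerate s.toList 0).foldl myHashAltStep PySem.Dict.empty
  -- second loop of Source B: total += first * possum over groups.values()
  g.values.foldl (fun t q => t + q.1 * q.2) 0

-- ===== PRECONDITION & SPEC =====
def Spec_myHash (s : String) (out : Int) : Prop := out = myHash_alt s
instance (s : String) (out : Int) : Decidable (Spec_myHash s out) := by unfold Spec_myHash; infer_instance

-- ===== CLAIM (what is proved, stated in full; the proofs are below) =====
def Claim_equal_myHash : Prop := ∀ (s : String), Dom_myHash s → Spec_myHash s (myHash s)

-- ===== LEMMAS AND PROOFS =====

-- the grouped total read off a B-dict: sum over its keys of first * possum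
def groupSum (g : PySem.Dict Char (Int × Int)) : Int :=
  (g.keys.map (fun k => (g.getD k (0, 0)).1 * (g.getD k (0, 0)).2)).sum

-- updating one key of a nodup key list changes a mapped sum by the delta at that key
lemma sum_map_update {f f' : Char → Int} (ks : List Char) (c : Char)
    (hnd : ks.Nodup) (hc : c ∈ ks) (hagree : ∀ k, k ≠ c → f' k = f k) :
    (ks.map f').sum = (ks.map f).sum - f c + f' c := by
  induction ks with
  | nil => cases hc
  | cons k t ih =>
    rcases List.mem_cons.mp hc with h | h
    · subst h
      have : ∀ x ∈ t, f' x = f x := fun x hx =>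
        hagree x (fun e => (List.nodup_cons.mp hnd).1 (e ▸ hx))
      simp [List.map_congr_left this]; ring
    · have hnk : k ≠ c := fun e => (List.nodup_cons.mp hnd).1 (e ▸ h)
      rw [List.map_cons, List.map_cons, List.sum_cons, List.sum_cons,
        ih (List.nodup_cons.mp hnd).2 h, hagree k hnk]
      ring

-- one B-step, seen key: keys fixed, grouped sum grows by first(c) * i
lemma groupSum_step_seen (g : PySem.Dict Char (Int × Int)) (i : Int) (c : Char)
    (hnd : g.keys.Nodup) (hc : g.contains c = true) :
    groupSum (myHashAltStep g (i, c))
      = groupSum g + (g.getD c (0, 0)).1 * i := by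
  have hmem : c ∈ g.keys := (PySem.Dict.contains_iff_mem_keys g c).mp hc
  have hkeys : (g.insert c ((g.getD c (0,0)).1, (g.getD c (0,0)).2 + i)).keys = g.keys :=
    PySem.Dict.keys_insert_of_contains g _ hc
  simp only [myHashAltStep, hc, if_true, groupSum, hkeys]
  rw [sum_map_update g.keys c hnd hmem
    (f := fun k => (g.getD k (0,0)).1 * (g.getD k (0,0)).2)
    (f' := fun k => (((g.insert c ((g.getD c (0,0)).1, (g.getD c (0,0)).2 + i)).getD k (0,0)).1
        * ((g.insert c ((g.getD c (0,0)).1, (g.getD c (0,0)).2 + i)).getD k (0,0)).2))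
    (by intro k hk; simp [PySem.Dict.getD_insert, hk])]
  rw [PySem.Dict.getD_insert_self g c]
  ring

-- one B-step, fresh key: keys extended by c, grouped sum grows by i * i
lemma groupSum_step_fresh (g : PySem.Dict Char (Int × Int)) (i : Int) (c : Char)
    (hc : g.contains c = false) :
    groupSum (myHashAltStep g (i, c)) = groupSum g + i * i := by
  have hkeys : (g.insert c (i, i)).keys = g.keys ++ [c] :=
    PySem.Dict.keys_insert_of_not_contains g _ hc
  have hcn : c ∉ g.keys := fun h =>
    by rw [(PySem.Dict.contains_iff_mem_keys g c).mpr h] at hc; cases hc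
  simp only [myHashAltStep, hc, Bool.false_eq_true, if_false, groupSum, hkeys]
  rw [List.map_append, List.sum_append]
  have : ∀ k ∈ g.keys, ((g.insert c (i,i)).getD k (0,0)).1 * ((g.insert c (i,i)).getD k (0,0)).2
      = (g.getD k (0,0)).1 * (g.getD k (0,0)).2 := by
    intro k hk
    have hkc : k ≠ c := fun e => hcn (e ▸ hk)
    simp [PySem.Dict.getD_insert, hkc]
  rw [List.map_congr_left this]
  simp [PySem.Dict.getD_insert_self]

-- the parallel loop invariant: A's running sum tracks the grouped total of B's dict
lemma loop_eq : ∀ (l : List Char) (i : Int) (d : PySem.Dict Char Int)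
    (g : PySem.Dict Char (Int × Int)) (h : Int),
    g.keys.Nodup →
    (∀ c, d.get? c = (g.get? c).map Prod.fst) →
    myHashGo l i d h
      = h - groupSum g + groupSum ((PySem.List.enumerate l i).foldl myHashAltStep g)
      ∧ ((PySem.List.enumerate l i).foldl myHashAltStep g).keys.Nodup := by
  intro l
  induction l with
  | nil =>
    intro i d g h hnd _
    simp [myHashGo, PySem.List.enumerate_nil, hnd]
  | cons c rest ih =>
    intro i d g h hnd hinv
    have hcont : d.contains c = g.contains c := by
      rw [PySem.Dict.contains_eq_isSome_get?, PySem.Dict.contains_eq_isSome_get?, hinv c]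
      cases g.get? c <;> rfl
    rw [PySem.List.enumerate_cons, List.foldl_cons]
    by_cases hc : g.contains c = true
    · -- seen before
      have hdc : d.contains c = true := hcont.trans hc
      obtain ⟨q, hq⟩ : ∃ q, g.get? c = some q := by
        rw [PySem.Dict.contains_eq_isSome_get?] at hc
        cases hgq : g.get? c
        · rw [hgq] at hc; cases hc
        · exact ⟨_, rfl⟩
      have hdgc : d.getD c 0 = q.1 := by
        rw [PySem.Dict.getD_eq_get?_getD, hinv c, hq]; rfl
      have hgD : g.getD c (0,0) = q := PySem.Dict.getD_of_get?_eq_some g (0,0) hq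
      have hndg' : (myHashAltStep g (i, c)).keys.Nodup := by
        simpa [myHashAltStep, hc, PySem.Dict.keys_insert_of_contains g _ hc] using hnd
      have hinv' : ∀ c', d.get? c' = ((myHashAltStep g (i, c)).get? c').map Prod.fst := by
        intro c'
        simp only [myHashAltStep, hc, if_true]
        by_cases hcc : c' = c
        · subst hcc
          rw [PySem.Dict.get?_insert_self, hinv c', hq, hgD]
          rfl
        · rw [PySem.Dict.get?_insert_of_ne _ _ hcc, hinv c']
      obtain ⟨ihe, ihn⟩ := ih (i + 1) d (myHashAltStep g (i, c)) (h + d.getD c 0 * i) hndg' hinv'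
      refine ⟨?_, ihn⟩
      rw [show myHashGo (c :: rest) i d h
          = myHashGo rest (i + 1) d (h + d.getD c 0 * i) by simp [myHashGo, hdc], ihe,
        groupSum_step_seen g i c hnd hc, hdgc, hgD]
      ring_nf
    · -- fresh
      have hgc : g.contains c = false := by simpa using hc
      have hdc : d.contains c = false := hcont.trans hgc
      have hndg' : (myHashAltStep g (i, c)).keys.Nodup := by
        have hcn : c ∉ g.keys := fun hm =>
          by rw [(PySem.Dict.contains_iff_mem_keys g c).mpr hm] at hgc; cases hgc
        simp only [myHashAltStep, hgc, Bool.false_eq_true, if_false,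
          PySem.Dict.keys_insert_of_not_contains g _ hgc]
        simp only [List.nodup_append, List.nodup_singleton, true_and]
        refine ⟨hnd, ?_⟩
        intro a ha b hb
        rw [List.mem_singleton] at hb
        subst hb
        exact fun e => hcn (e ▸ ha)
      have hinv' : ∀ c', (d.insert c i).get? c' = ((myHashAltStep g (i, c)).get? c').map Prod.fst := by
        intro c'
        simp only [myHashAltStep, hgc, Bool.false_eq_true, if_false]
        by_cases hcc : c' = c
        · subst hcc
          rw [PySem.Dict.get?_insert_self, PySem.Dict.get?_insert_self]; rfl
        · rw [PySem.Dict.get?_insert_of_ne _ _ hcc, PySem.Dict.get?_insert_of_ne _ _ hcc,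
            hinv c']
      have hdgc : (d.insert c i).getD c 0 = i := PySem.Dict.getD_insert_self _ _ _ _
      obtain ⟨ihe, ihn⟩ := ih (i + 1) (d.insert c i) (myHashAltStep g (i, c))
        (h + (d.insert c i).getD c 0 * i) hndg' hinv'
      refine ⟨?_, ihn⟩
      rw [show myHashGo (c :: rest) i d h
          = myHashGo rest (i + 1) (d.insert c i) (h + (d.insert c i).getD c 0 * i) by
            simp [myHashGo, hdc], ihe,
        groupSum_step_fresh g i c hgc, hdgc]
      ring_nf

-- ===== VERDICT (by name: the statement is the Claim_ definition above) =====
theorem myHash_spec : Claim_equal_myHash := by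
  intro s _
  show myHash s = myHash_alt s
  obtain ⟨he, hn⟩ := loop_eq s.toList 0 PySem.Dict.empty PySem.Dict.empty 0
    (by simp [PySem.Dict.keys_empty]) (by intro c; simp [PySem.Dict.get?_empty])
  have hge : groupSum (PySem.Dict.empty : PySem.Dict Char (Int × Int)) = 0 := by
    simp [groupSum, PySem.Dict.keys_empty]
  rw [myHash, myHash_alt, he, hge]
  have hv := PySem.Dict.values_eq_map_keys
    ((PySem.List.enumerate s.toList 0).foldl myHashAltStep PySem.Dict.empty) hn (0, 0)
  rw [hv, PySem.List.foldl_add _ (fun q : Int × Int => q.1 * q.2)]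
  rw [List.map_map]
  simp only [Function.comp_def]
  rfl
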